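-- pv_equiv track=rewrite | github.com/ju-hu-sang/codingtest | 프로그래머스/0/181918. 배열 만들기 4/배열 만들기 4.py | solution
-- ===== SOURCE A (Python) =====
-- def solution(arr):
--     stk = []
--     i= 0
--     while i < len(arr):
--         if not stk:
--             stk.append(arr[i])
--             i = i+1
--         elif (len(stk) >0) and (stk[-1] < arr[i]):
--             stk.append(arr[i])
--             i = i+1
--         elif (len(stk) >0) and (stk[-1] >= arr[i]):
--             stk.pop()
--
--     return stk
-- ===== SOURCE B (Python) =====
-- def solution(arr):
--     out = []
--     m = None
--     for x in reversed(arr):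
--         if m is None or x < m:
--             out.append(x)
--             m = x
--     return out[::-1]
-- ===== Notes on version B (the rewrite author's own statement) =====
-- stated objective: faster
-- what changed: Instead of A's forward monotonic-stack simulation with conditional pops, B observes that an element survives iff it is strictly smaller than every later element, and computes these suffix strict minima in one backward pass keeping only a running minimum (no stack, no pops), reversing at the end.
import Mathlib
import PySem

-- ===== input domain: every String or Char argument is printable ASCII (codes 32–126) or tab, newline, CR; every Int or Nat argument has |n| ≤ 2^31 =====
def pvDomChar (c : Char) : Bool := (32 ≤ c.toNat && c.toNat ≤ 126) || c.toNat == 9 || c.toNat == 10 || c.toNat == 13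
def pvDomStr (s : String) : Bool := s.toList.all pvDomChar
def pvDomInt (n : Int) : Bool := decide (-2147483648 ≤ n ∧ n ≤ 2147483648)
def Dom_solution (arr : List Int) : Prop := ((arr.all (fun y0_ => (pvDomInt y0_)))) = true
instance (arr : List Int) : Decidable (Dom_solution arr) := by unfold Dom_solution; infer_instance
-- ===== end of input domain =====

-- B replaces A's forward monotonic-stack loop with a single backward pass keeping a running
-- minimum (an element survives iff it is strictly below every later element): no stack, no pops.

-- ===== PORT A =====
-- A's while loop over state (stk, i); stack kept head-first (Python's stk[-1] is the head),
-- final stack reversed to Python's append order. Each iteration either pushes and advances i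
-- or pops and keeps i, exactly as A; the structural fuel 2*len+1 only makes the loop total
-- (each iteration pushes, at most once per index, or pops a previous push, so 2*len+1 steps
-- always suffice and the fuel never runs out).
def solutionLoop (arr : List Int) : Nat → List Int → Nat → List Int
  | 0, stk, _ => stk
  | fuel + 1, stk, i =>
    if h : i < arr.length then
      match stk with
      | [] => solutionLoop arr fuel [arr[i]] (i + 1)          -- if not stk: append, i += 1
      | t :: rest =>
        if t < arr[i] then
          solutionLoop arr fuel (arr[i] :: t :: rest) (i + 1) -- elif stk[-1] < arr[i]: append, i += 1
        else
          solutionLoop arr fuel rest i                        -- elif stk[-1] >= arr[i]: pop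
    else stk

def solution (arr : List Int) : List Int :=
  (solutionLoop arr (2 * arr.length + 1) [] 0).reverse

-- ===== PORT B =====
-- loop body: 'if m is None or x < m: out.append(x); m = x'
def bStep (st : List Int × Option Int) (x : Int) : List Int × Option Int :=
  match st.2 with
  | none => (st.1 ++ [x], some x)
  | some v => if x < v then (st.1 ++ [x], some x) else st

-- 'for x in reversed(arr): …' then 'return out[::-1]'
def solution_alt (arr : List Int) : List Int :=
  ((arr.reverse.foldl bStep ([], none)).1).reverse

-- ===== PRECONDITION & SPEC =====
def Spec_solution (arr : List Int) (out : List Int) : Prop := out = solution_alt arr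
instance (arr : List Int) (out : List Int) : Decidable (Spec_solution arr out) := by unfold Spec_solution; infer_instance

-- ===== CLAIM (what is proved, stated in full; the proofs are below) =====
def Claim_equal_solution : Prop := ∀ (arr : List Int), Dom_solution arr → Spec_solution arr (solution arr)

-- ===== LEMMAS AND PROOFS =====

-- proof-only helper: the inner popping phase A performs at each index
def popGE (stk : List Int) (x : Int) : List Int :=
  match stk with
  | t :: rest => if t ≥ x then popGE rest x else t :: rest
  | [] => []

-- proof-only helper: A's whole stack as a left fold (head-first, head = top)
def stackOf (xs : List Int) : List Int := xs.foldl (fun stk x => x :: popGE stk x) []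

-- proof-only helper: B's kept elements, in scan order, with optional running minimum m
def keep : List Int → Option Int → List Int
  | [], _ => []
  | x :: t, none => x :: keep t (some x)
  | x :: t, some m => if x < m then x :: keep t (some x) else keep t (some m)

-- A's loop computes the monotonic-stack fold over the remaining suffix, given enough fuel
lemma solutionLoop_eq_foldl (arr : List Int) : ∀ (fuel : Nat) (stk : List Int) (i : Nat),
    2 * (arr.length - i) + stk.length + 1 ≤ fuel →
    solutionLoop arr fuel stk i = (arr.drop i).foldl (fun stk x => x :: popGE stk x) stk := by
  intro fuel
  induction fuel with
  | zero => intro stk i hb; omega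
  | succ fuel ih =>
    intro stk i hb
    by_cases h : i < arr.length
    · rw [show List.drop i arr = arr[i] :: List.drop (i + 1) arr from List.drop_eq_getElem_cons h,
        List.foldl_cons]
      cases stk with
      | nil =>
        rw [solutionLoop]
        simp only [h, dif_pos]
        rw [ih [arr[i]] (i + 1) (by simp; omega)]
        simp [popGE]
      | cons t rest =>
        by_cases hlt : t < arr[i]
        · rw [solutionLoop]
          simp only [h, dif_pos, if_pos hlt]
          rw [ih (arr[i] :: t :: rest) (i + 1) (by simp at hb ⊢; omega)]
          simp [popGE, not_le.mpr hlt, ge_iff_le]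
        · rw [solutionLoop]
          simp only [h, dif_pos, if_neg hlt]
          rw [ih rest i (by simp at hb ⊢; omega),
            show List.drop i arr = arr[i] :: List.drop (i + 1) arr from List.drop_eq_getElem_cons h,
            List.foldl_cons]
          simp [popGE, ge_iff_le, not_lt.mp hlt]
    · rw [List.drop_eq_nil_of_le (by omega), solutionLoop]
      simp [h]

-- popping tops ≥ y off a kept list with bound x ≥ y is the same as keeping with bound y
lemma popGE_keep_some : ∀ (l : List Int) (x y : Int), y ≤ x →
    popGE (keep l (some x)) y = keep l (some y) := by
  intro l
  induction l with
  | nil => intro x y _; simp [keep, popGE]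
  | cons z t ih =>
    intro x y hyx
    by_cases hzx : z < x
    · simp only [keep, if_pos hzx]
      by_cases hzy : z < y
      · rw [popGE]; simp [hzy]
      · rw [popGE]; simp only [ge_iff_le, not_lt.mp hzy, if_pos]
        rw [ih z y (not_lt.mp hzy)]
        simp [hzy]
    · simp only [keep, if_neg hzx]
      rw [ih x y hyx]
      simp [show ¬ z < y from fun h => hzx (lt_of_lt_of_le h hyx)]

lemma popGE_keep_none : ∀ (l : List Int) (y : Int),
    popGE (keep l none) y = keep l (some y) := by
  intro l y
  cases l with
  | nil => simp [keep, popGE]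
  | cons x t =>
    simp only [keep]
    by_cases hxy : x < y
    · rw [popGE]; simp [not_le.mpr hxy, hxy]
    · rw [popGE]; simp only [ge_iff_le, not_lt.mp hxy, if_pos]
      rw [popGE_keep_some t x y (not_lt.mp hxy)]
      simp [hxy]

-- A's stack equals B's kept list of the reversed input
lemma stackOf_eq_keep : ∀ (xs : List Int), stackOf xs = keep xs.reverse none := by
  intro xs
  induction xs using List.reverseRecOn with
  | nil => simp [stackOf, keep]
  | append_singleton xs y ih =>
    have : stackOf (xs ++ [y]) = y :: popGE (stackOf xs) y := by
      simp [stackOf, List.foldl_append]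
    rw [this, ih, popGE_keep_none, List.reverse_append]
    simp [keep]

-- B's fold accumulates exactly 'keep'
lemma foldl_bStep_fst : ∀ (l : List Int) (out : List Int) (m : Option Int),
    (l.foldl bStep (out, m)).1 = out ++ keep l m := by
  intro l
  induction l with
  | nil => intro out m; simp [keep]
  | cons x t ih =>
    intro out m
    rw [List.foldl_cons]
    cases m with
    | none => rw [show bStep (out, none) x = (out ++ [x], some x) from rfl, ih]; simp [keep]
    | some v =>
      by_cases hxv : x < v
      · rw [show bStep (out, some v) x = (out ++ [x], some x) by simp [bStep, hxv], ih]
        simp [keep, hxv]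
      · rw [show bStep (out, some v) x = (out, some v) by simp [bStep, hxv], ih]
        simp [keep, hxv]

-- ===== VERDICT (by name: the statement is the Claim_ definition above) =====
theorem solution_spec : Claim_equal_solution := by
  intro arr _
  unfold Spec_solution solution solution_alt
  rw [solutionLoop_eq_foldl arr (2 * arr.length + 1) [] 0 (by simp), foldl_bStep_fst]
  have : (arr.drop 0).foldl (fun stk x => x :: popGE stk x) [] = stackOf arr := by
    simp [stackOf]
  rw [this, stackOf_eq_keep]
  simp
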